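-- pv_equiv track=rewrite | github.com/SiwenSusan/SiwenSusan.github.io | Project 7/language.py | computer_community_center_service_grid
-- ===== SOURCE A (Python) =====
-- def computer_community_center_service_grid(grid, centers):
--   """
--   to know which homes are within the service distance of a community center
--
--   Input:
--   grid(list of lists): representing regions
--   centers(list of tuples): represent all the community centers in a region
--
--
--   Output:
--   service_drid(Boolean) : True if the home is within the service distance; False otherwise
--
--   """
--   n = len(grid)
--   service_grid = [[False for i in range(n)] for j in range(n)]
--   for (center_x, center_y), R in centers:
--     for x in range(max(center_x - R, 0), min(center_x + R + 1, n)):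
--       for y in range(max(center_y - R, 0), min(center_y + R + 1, n)):
--         service_grid[x][y] = True
--
--   return service_grid
-- ===== SOURCE B (Python) =====
-- def computer_community_center_service_grid(grid, centers):
--     """Per-cell test: a cell is served iff some center's square covers it.
--     No mutable stamping; builds the output directly by comprehension."""
--     n = len(grid)
--     return [[any(cx - r <= x <= cx + r and cy - r <= y <= cy + r
--                  for (cx, cy), r in centers)
--              for y in range(n)]
--             for x in range(n)]
-- ===== Notes on version B (the rewrite author's own statement) =====
-- stated objective: simpler
-- what changed: A builds a mutable n-by-n grid and stamps each center's clamped square into it cell by cell; B has no mutation at all: it builds the output directly with a per-cell comprehension testing whether any center's square covers the cell.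
import Mathlib
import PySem

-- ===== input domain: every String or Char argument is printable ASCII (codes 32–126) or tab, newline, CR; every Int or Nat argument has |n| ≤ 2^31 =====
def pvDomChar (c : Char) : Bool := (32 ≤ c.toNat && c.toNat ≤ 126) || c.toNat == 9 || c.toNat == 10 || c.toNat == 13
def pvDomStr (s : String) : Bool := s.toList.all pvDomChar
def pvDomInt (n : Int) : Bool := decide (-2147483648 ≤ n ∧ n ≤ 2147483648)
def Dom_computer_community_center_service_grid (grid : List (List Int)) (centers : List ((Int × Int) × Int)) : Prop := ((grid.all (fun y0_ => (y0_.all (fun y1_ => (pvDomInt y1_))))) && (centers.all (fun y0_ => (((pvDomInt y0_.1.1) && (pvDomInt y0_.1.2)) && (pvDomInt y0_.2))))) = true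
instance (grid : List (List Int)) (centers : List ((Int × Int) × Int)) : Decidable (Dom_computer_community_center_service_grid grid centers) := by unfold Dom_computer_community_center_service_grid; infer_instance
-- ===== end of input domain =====

-- B replaces A's per-center mutable stamping with a direct per-cell comprehension
-- (a cell is served iff some center's square covers it); objective: simpler, no mutation.

-- ===== PORT A =====
-- service_grid[x][y] = True: the loop bounds guarantee 0 ≤ x < n and 0 ≤ y < n,
-- so modify/set at toNat is exact (Python would raise only on out-of-range, unreachable here).
def pvStampOne (n : Int) (sg : List (List Bool)) (c : (Int × Int) × Int) : List (List Bool) :=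
  (PySem.List.pyRange (max (c.1.1 - c.2) 0) (min (c.1.1 + c.2 + 1) n) 1).foldl
    (fun sg x =>
      (PySem.List.pyRange (max (c.1.2 - c.2) 0) (min (c.1.2 + c.2 + 1) n) 1).foldl
        (fun sg y => sg.modify x.toNat (fun row => row.set y.toNat true)) sg) sg

def computer_community_center_service_grid (grid : List (List Int)) (centers : List ((Int × Int) × Int)) : List (List Bool) :=
  let n : Int := (grid.length : Int)
  let service_grid : List (List Bool) :=
    (List.range grid.length).map (fun _ => (List.range grid.length).map (fun _ => false))
  centers.foldl (pvStampOne n) service_grid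

-- ===== PORT B =====
def pvCovers (x y : Int) (c : (Int × Int) × Int) : Bool :=
  decide (c.1.1 - c.2 ≤ x) && decide (x ≤ c.1.1 + c.2) &&
  decide (c.1.2 - c.2 ≤ y) && decide (y ≤ c.1.2 + c.2)

def computer_community_center_service_grid_alt (grid : List (List Int)) (centers : List ((Int × Int) × Int)) : List (List Bool) :=
  let n := grid.length
  (List.range n).map (fun (x : Nat) => (List.range n).map (fun (y : Nat) =>
    centers.any (pvCovers (x : Int) (y : Int))))

-- ===== PRECONDITION & SPEC =====
def Spec_computer_community_center_service_grid (grid : List (List Int)) (centers : List ((Int × Int) × Int)) (out : List (List Bool)) : Prop := out = computer_community_center_service_grid_alt grid centers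
instance (grid : List (List Int)) (centers : List ((Int × Int) × Int)) (out : List (List Bool)) : Decidable (Spec_computer_community_center_service_grid grid centers out) := by unfold Spec_computer_community_center_service_grid; infer_instance

-- ===== CLAIM (what is proved, stated in full; the proofs are below) =====
def Claim_equal_computer_community_center_service_grid : Prop := ∀ (grid : List (List Int)) (centers : List ((Int × Int) × Int)), Dom_computer_community_center_service_grid grid centers → Spec_computer_community_center_service_grid grid centers (computer_community_center_service_grid grid centers)

-- ===== LEMMAS AND PROOFS =====

-- modify twice at the same index composes
theorem pv_modify_modify {α : Type} (l : List α) (i : Nat) (f g : α → α) :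
    (l.modify i f).modify i g = l.modify i (fun a => g (f a)) := by
  induction l generalizing i with
  | nil => cases i <;> rfl
  | cons a l ih =>
    cases i with
    | zero => rfl
    | succ i => simpa [List.modify] using ih i

-- the inner y-loop only touches row i
theorem pv_inner_fold (ys : List Int) (i : Nat) (sg : List (List Bool)) :
    ys.foldl (fun sg y => sg.modify i (fun row => row.set y.toNat true)) sg
      = sg.modify i (fun row => ys.foldl (fun r y => r.set y.toNat true) row) := by
  induction ys generalizing sg with
  | nil =>
    apply List.ext_getElem?
    intro k
    simp [List.getElem?_modify]
  | cons y ys ih =>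
    simp only [List.foldl_cons, ih, pv_modify_modify]

-- entry view of a row stamp
theorem pv_row_get (ys : List Int) (row : List Bool) (j : Nat) (hys : ∀ y ∈ ys, 0 ≤ y) :
    (ys.foldl (fun r y => r.set y.toNat true) row)[j]?
      = row[j]?.map (fun b => b || ys.any (fun y => y == (j : Int))) := by
  induction ys generalizing row with
  | nil =>
    cases h : row[j]? <;> simp [h]
  | cons y ys ih =>
    have hy : 0 ≤ y := hys y (by simp)
    have hys' : ∀ y ∈ ys, 0 ≤ y := fun y hy => hys y (by simp [hy])
    simp only [List.foldl_cons, ih _ hys']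
    rw [List.getElem?_set]
    by_cases hj : j < row.length
    · have hrow : row[j]? = some row[j] := List.getElem?_eq_getElem hj
      by_cases he : y.toNat = j
      · have : y == (j : Int) := by
          simp only [beq_iff_eq]; omega
        simp [he, hj, hrow, this]
      · have : (y == (j : Int)) = false := by
          simp only [beq_eq_false_iff_ne, ne_eq]; omega
        simp [he, hrow, this]
    · have hrow : row[j]? = none := List.getElem?_eq_none (by omega)
      by_cases he : y.toNat = j <;> simp [he, hj, hrow]

-- row stamping is idempotent and length preserving
theorem pv_row_len (ys : List Int) (row : List Bool) :
    (ys.foldl (fun r y => r.set y.toNat true) row).length = row.length := by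
  induction ys generalizing row with
  | nil => rfl
  | cons y ys ih => simp [List.foldl_cons, ih]

theorem pv_row_idem (ys : List Int) (row : List Bool) (hys : ∀ y ∈ ys, 0 ≤ y) :
    ys.foldl (fun r y => r.set y.toNat true) (ys.foldl (fun r y => r.set y.toNat true) row)
      = ys.foldl (fun r y => r.set y.toNat true) row := by
  apply List.ext_getElem?
  intro j
  rw [pv_row_get _ _ _ hys, pv_row_get _ _ _ hys]
  cases h : row[j]? <;> simp [Bool.or_assoc]

-- the outer x-loop, with the same idempotent row action at each visited row
theorem pv_outer_fold (xs : List Int) (g : List Bool → List Bool)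
    (hg : ∀ r, g (g r) = g r) (sg : List (List Bool)) (k : Nat) :
    (xs.foldl (fun sg x => sg.modify x.toNat g) sg)[k]?
      = if xs.any (fun x => x.toNat == k) then sg[k]?.map g else sg[k]? := by
  induction xs generalizing sg with
  | nil => simp
  | cons x xs ih =>
    simp only [List.foldl_cons, List.any_cons]
    rw [ih]
    by_cases he : x.toNat = k
    · by_cases hm : xs.any (fun x => x.toNat == k)
      · simp [hm, he, List.getElem?_modify]
        cases h : sg[k]? <;> simp [hg]
      · simp [hm, he, List.getElem?_modify]
    · have : (x.toNat == k) = false := by simp [he]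
      by_cases hm : xs.any (fun x => x.toNat == k) <;>
        simp [hm, this, List.getElem?_modify, he]

-- entry of a grid
def pvEntry (sg : List (List Bool)) (k j : Nat) : Option Bool :=
  sg[k]?.bind (fun row => row[j]?)

-- one center's stamp, seen at entry (k, j) with k, j inside the grid
theorem pv_stamp_entry (nI : Int) (c : (Int × Int) × Int) (sg : List (List Bool))
    (k j : Nat) (hk : (k : Int) < nI) (hj : (j : Int) < nI) :
    pvEntry (pvStampOne nI sg c) k j
      = (pvEntry sg k j).map (fun b => b || pvCovers (k : Int) (j : Int) c) := by
  obtain ⟨⟨cx, cy⟩, R⟩ := c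
  unfold pvStampOne pvEntry
  have hys : ∀ y ∈ PySem.List.pyRange (max (cy - R) 0) (min (cy + R + 1) nI) 1, 0 ≤ y := by
    intro y hy
    have := PySem.List.mem_pyRange_one.mp hy
    omega
  have hg : ∀ r : List Bool, (PySem.List.pyRange (max (cy - R) 0) (min (cy + R + 1) nI) 1).foldl
      (fun (r : List Bool) y => r.set y.toNat true)
      ((PySem.List.pyRange (max (cy - R) 0) (min (cy + R + 1) nI) 1).foldl
        (fun (r : List Bool) y => r.set y.toNat true) r)
      = (PySem.List.pyRange (max (cy - R) 0) (min (cy + R + 1) nI) 1).foldl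
        (fun (r : List Bool) y => r.set y.toNat true) r := fun r => pv_row_idem _ _ hys
  simp only [pv_inner_fold]
  rw [pv_outer_fold _ _ hg]
  have hxmem : (PySem.List.pyRange (max (cx - R) 0) (min (cx + R + 1) nI) 1).any
      (fun x => x.toNat == k) = (decide (cx - R ≤ (k : Int)) && decide ((k : Int) ≤ cx + R)) := by
    by_cases hc : cx - R ≤ (k : Int) ∧ (k : Int) ≤ cx + R
    · have : ((k : Int) ∈ PySem.List.pyRange (max (cx - R) 0) (min (cx + R + 1) nI) 1) := by
        rw [PySem.List.mem_pyRange_one]; omega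
      rw [List.any_eq_true.mpr ⟨(k : Int), this, by simp⟩]
      simp [hc.1, hc.2]
    · have : ∀ x ∈ PySem.List.pyRange (max (cx - R) 0) (min (cx + R + 1) nI) 1,
          ¬ (x.toNat == k) = true := by
        intro x hx
        have hm := PySem.List.mem_pyRange_one.mp hx
        simp only [beq_iff_eq]
        omega
      rw [List.any_eq_false.mpr this]
      rcases not_and_or.mp hc with h | h <;> simp [h]
  rw [hxmem]
  have hymem : ∀ row : List Bool,
      ((PySem.List.pyRange (max (cy - R) 0) (min (cy + R + 1) nI) 1).foldl
        (fun r y => r.set y.toNat true) row)[j]?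
      = row[j]?.map (fun b => b || (decide (cy - R ≤ (j : Int)) && decide ((j : Int) ≤ cy + R))) := by
    intro row
    rw [pv_row_get _ _ _ hys]
    have : (PySem.List.pyRange (max (cy - R) 0) (min (cy + R + 1) nI) 1).any
        (fun y => y == (j : Int)) = (decide (cy - R ≤ (j : Int)) && decide ((j : Int) ≤ cy + R)) := by
      by_cases hc : cy - R ≤ (j : Int) ∧ (j : Int) ≤ cy + R
      · have : ((j : Int) ∈ PySem.List.pyRange (max (cy - R) 0) (min (cy + R + 1) nI) 1) := by
          rw [PySem.List.mem_pyRange_one]; omega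
        rw [List.any_eq_true.mpr ⟨(j : Int), this, by simp⟩]
        simp [hc.1, hc.2]
      · have : ∀ y ∈ PySem.List.pyRange (max (cy - R) 0) (min (cy + R + 1) nI) 1,
            ¬ (y == (j : Int)) = true := by
          intro y hy
          have hm := PySem.List.mem_pyRange_one.mp hy
          simp only [beq_iff_eq]
          omega
        rw [List.any_eq_false.mpr this]
        rcases not_and_or.mp hc with h | h <;> simp [h]
    rw [this]
  have hcov : pvCovers (k : Int) (j : Int) ((cx, cy), R)
      = ((decide (cx - R ≤ (k : Int)) && decide ((k : Int) ≤ cx + R)) &&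
         (decide (cy - R ≤ (j : Int)) && decide ((j : Int) ≤ cy + R))) := by
    simp [pvCovers, Bool.and_assoc]
  by_cases hx : (decide (cx - R ≤ (k : Int)) && decide ((k : Int) ≤ cx + R)) = true
  · rw [hx]
    cases h : sg[k]? with
    | none => simp
    | some row =>
      simp only [Bool.and_eq_true, decide_eq_true_eq] at hx
      cases hr : row[j]? <;> simp [hr, hymem row, hcov, hx.1, hx.2]
  · have hxf : (decide (cx - R ≤ (k : Int)) && decide ((k : Int) ≤ cx + R)) = false :=
      Bool.eq_false_iff.mpr hx
    rw [hxf]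
    simp only [Bool.false_eq_true, if_false]
    cases h : sg[k]? with
    | none => simp
    | some row =>
      simp only [Bool.and_eq_true, decide_eq_true_eq, not_and] at hx
      rcases imp_iff_not_or.mp hx with h' | h' <;>
        cases hr : row[j]? <;> simp [hr, hcov, h']

-- folding all centers
theorem pv_fold_entry (nI : Int) (cs : List ((Int × Int) × Int)) (sg : List (List Bool))
    (k j : Nat) (hk : (k : Int) < nI) (hj : (j : Int) < nI) :
    pvEntry (cs.foldl (pvStampOne nI) sg) k j
      = (pvEntry sg k j).map (fun b => b || cs.any (pvCovers (k : Int) (j : Int))) := by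
  induction cs generalizing sg with
  | nil => cases h : pvEntry sg k j <;> simp [h]
  | cons c cs ih =>
    simp only [List.foldl_cons]
    rw [ih, pv_stamp_entry nI c sg k j hk hj]
    cases h : pvEntry sg k j <;> simp [Bool.or_assoc]

-- lengths are preserved by stamping
theorem pv_stamp_len (nI : Int) (cs : List ((Int × Int) × Int)) (sg : List (List Bool)) :
    (cs.foldl (pvStampOne nI) sg).length = sg.length := by
  induction cs generalizing sg with
  | nil => rfl
  | cons c cs ih =>
    rw [List.foldl_cons, ih]
    obtain ⟨⟨cx, cy⟩, R⟩ := c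
    unfold pvStampOne
    simp only [pv_inner_fold]
    generalize PySem.List.pyRange (max (cx - R) 0) (min (cx + R + 1) nI) 1 = xs
    induction xs generalizing sg with
    | nil => rfl
    | cons x xs ihx => simp [List.foldl_cons, ihx]

-- row lengths are preserved by stamping
theorem pv_stamp_row_len (nI : Int) (cs : List ((Int × Int) × Int)) (sg : List (List Bool))
    (m : Nat) (h : ∀ (k : Nat) (row : List Bool), sg[k]? = some row → row.length = m)
    (k : Nat) (row : List Bool) (hr : (cs.foldl (pvStampOne nI) sg)[k]? = some row) :
    row.length = m := by
  induction cs generalizing sg with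
  | nil => exact h k row hr
  | cons c cs ih =>
    rw [List.foldl_cons] at hr
    refine ih (pvStampOne nI sg c) ?_ hr
    intro k row hrow
    obtain ⟨⟨cx, cy⟩, R⟩ := c
    unfold pvStampOne at hrow
    simp only [pv_inner_fold] at hrow
    have hys : ∀ y ∈ PySem.List.pyRange (max (cy - R) 0) (min (cy + R + 1) nI) 1, 0 ≤ y := by
      intro y hy
      have := PySem.List.mem_pyRange_one.mp hy
      omega
    rw [pv_outer_fold _ _ (fun r => pv_row_idem _ _ hys)] at hrow
    split at hrow
    · cases hsg : sg[k]? with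
      | none => simp [hsg] at hrow
      | some row' =>
        rw [hsg] at hrow
        simp only [Option.map_some, Option.some.injEq] at hrow
        rw [← hrow, pv_row_len]
        exact h k row' hsg
    · exact h k row hrow

-- ===== VERDICT (by name: the statement is the Claim_ definition above) =====
theorem computer_community_center_service_grid_spec : Claim_equal_computer_community_center_service_grid := by
  intro grid centers _
  unfold Spec_computer_community_center_service_grid
  unfold computer_community_center_service_grid computer_community_center_service_grid_alt
  simp only []
  set n := grid.length with hn
  set init : List (List Bool) :=
    (List.range n).map (fun _ => (List.range n).map (fun _ => false)) with hinit
  have hinitlen : init.length = n := by simp [hinit]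
  have hinitrow : ∀ (k : Nat) (row : List Bool), init[k]? = some row → row.length = n := by
    intro k row h
    rw [hinit] at h
    rcases k.lt_or_ge n with hk | hk
    · rw [List.getElem?_map, List.getElem?_range hk] at h
      simp only [Option.map_some, Option.some.injEq] at h
      simp [← h]
    · rw [List.getElem?_map, List.getElem?_eq_none (by simpa using hk)] at h
      simp at h
  apply List.ext_getElem
  · rw [pv_stamp_len, hinitlen, List.length_map, List.length_range]
  · intro k h1 h2
    rw [pv_stamp_len, hinitlen] at h1
    rw [List.length_map, List.length_range] at h2
    have hkI : ((k : Int) < (n : Int)) := by exact_mod_cast h1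
    -- the k-th rows
    apply List.ext_getElem
    · have hrow : (centers.foldl (pvStampOne (n : Int)) init)[k]?
          = some (centers.foldl (pvStampOne (n : Int)) init)[k] :=
        List.getElem?_eq_getElem (by rw [pv_stamp_len, hinitlen]; exact h1)
      rw [pv_stamp_row_len (n : Int) centers init n hinitrow k _ hrow]
      simp [List.getElem_map]
    · intro j hj1 hj2
      have hj2' : j < n := by
        simp only [List.getElem_map, List.length_map, List.length_range] at hj2
        exact hj2
      have hjI : ((j : Int) < (n : Int)) := by exact_mod_cast hj2'
      have hA : pvEntry (centers.foldl (pvStampOne (n : Int)) init) k j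
          = some ((centers.foldl (pvStampOne (n : Int)) init)[k][j]) := by
        unfold pvEntry
        rw [List.getElem?_eq_getElem (by rw [pv_stamp_len, hinitlen]; exact h1),
          Option.bind_some, List.getElem?_eq_getElem hj1]
      have hInit : pvEntry init k j = some false := by
        unfold pvEntry
        rw [hinit]
        rw [List.getElem?_map, List.getElem?_range h1]
        simp [hj2']
      rw [pv_fold_entry (n : Int) centers init k j hkI hjI, hInit] at hA
      simp only [Option.map_some, Option.some.injEq, Bool.false_or] at hA
      simp only [List.getElem_map, List.getElem_range]
      exact hA.symm
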